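-- pv_equiv track=rewrite | github.com/ida/skriptz | plone/i18n/compareAndCreateGermanPot.py | getMsgsDict
-- ===== SOURCE A (Python) =====
-- def getMsgsDict(food):
--     paths = []
--     msgs_dict = []
--     msg_def = ''
--     msg_id = ''
--     msg_str = ''
--     FIRSTLINE = True
--     lines = food.splitlines()
--     for line in lines:
--         line = line.strip() # !
--         if FIRSTLINE:
--             FIRSTLINE = False
--             msg_def = line
--         if line.startswith('# ./'):
--             paths.append(line)
--         if line.startswith('msgid "'):
--             msg_id = line
--         if line.startswith('msgstr "'):
--             msg_str = line
--         if line == '':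
--             FIRSTLINE = True
--             msgs_dict.append([msg_def, paths, msg_id, msg_str])
--             paths = []
-- #    for i in range(len(msgs_dict)):
-- #	    print msgs_dict[i][1] #paths
--     return msgs_dict
-- ===== SOURCE B (Python) =====
-- def getMsgsDict(food):
--     lines = [l.strip() for l in food.splitlines()]
--     # partition into blocks terminated by a blank line; the trailing
--     # unterminated segment (no final blank) is discarded, as in the original
--     blocks = []
--     cur = []
--     for l in lines:
--         if l == '':
--             blocks.append(cur)
--             cur = []
--         else:
--             cur.append(l)
--     msg_id = ''
--     msg_str = ''
--     out = []
--     for b in blocks: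
--         msg_def = b[0] if b else ''
--         paths = [l for l in b if l.startswith('# ./')]
--         msg_id = next((l for l in reversed(b) if l.startswith('msgid "')), msg_id)
--         msg_str = next((l for l in reversed(b) if l.startswith('msgstr "')), msg_str)
--         out.append([msg_def, paths, msg_id, msg_str])
--     return out
-- ===== Notes on version B (the rewrite author's own statement) =====
-- stated objective: alternative
-- what changed: A's single flag-driven pass (FIRSTLINE state, per-line appends) is replaced by first partitioning the stripped lines into blank-terminated blocks and then folding over the blocks, computing each record from its block with filter/last-match while carrying msg_id/msg_str between blocks.
import Mathlib
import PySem

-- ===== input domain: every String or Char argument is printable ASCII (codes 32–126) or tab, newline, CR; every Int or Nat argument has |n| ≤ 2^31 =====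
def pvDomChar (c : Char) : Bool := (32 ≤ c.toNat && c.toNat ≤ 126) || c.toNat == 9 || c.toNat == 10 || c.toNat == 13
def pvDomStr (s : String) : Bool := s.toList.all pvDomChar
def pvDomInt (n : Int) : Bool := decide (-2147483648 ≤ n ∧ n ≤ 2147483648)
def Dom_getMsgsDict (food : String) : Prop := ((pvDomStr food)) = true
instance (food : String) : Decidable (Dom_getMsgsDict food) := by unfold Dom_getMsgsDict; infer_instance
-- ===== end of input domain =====

-- B re-decomposes A's single flag-driven pass as "partition lines into blank-terminated
-- blocks, then fold over the blocks" (objective: alternative decomposition, same cost).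

-- ===== PORT A =====
-- A's for-loop over lines, carrying (paths, msgs_dict, msg_def, msg_id, msg_str, FIRSTLINE).
def getMsgsDictLoop : List String → List String → List (String × List String × String × String) →
    String → String → String → Bool → List (String × List String × String × String)
  | [], _, msgsDict, _, _, _, _ => msgsDict
  | line :: rest, paths, msgsDict, msgDef, msgId, msgStr, firstline =>
    let line := PySem.Str.strip line
    -- 'if FIRSTLINE: FIRSTLINE = False; msg_def = line' — after this statement FIRSTLINE is always False
    let msgDef := if firstline then line else msgDef
    let paths := if PySem.Str.startswith line "# ./" then paths ++ [line] else paths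
    let msgId := if PySem.Str.startswith line "msgid \"" then line else msgId
    let msgStr := if PySem.Str.startswith line "msgstr \"" then line else msgStr
    if line = "" then
      getMsgsDictLoop rest [] (msgsDict ++ [(msgDef, paths, msgId, msgStr)]) msgDef msgId msgStr true
    else
      getMsgsDictLoop rest paths msgsDict msgDef msgId msgStr false

def getMsgsDict (food : String) : List (String × List String × String × String) :=
  getMsgsDictLoop (PySem.Str.splitlines food) [] [] "" "" "" true

-- ===== PORT B =====
-- split the (stripped) lines into blocks, one per blank line; trailing unterminated lines dropped
def pvToBlocks : List String → List (List String)
  | [] => []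
  | l :: rest =>
    if l = "" then [] :: pvToBlocks rest
    else
      match pvToBlocks rest with
      | [] => []
      | b :: bs => (l :: b) :: bs

-- fold over the blocks carrying msg_id / msg_str
def getMsgsDictAltLoop : List (List String) → String → String →
    List (String × List String × String × String) → List (String × List String × String × String)
  | [], _, _, out => out
  | b :: bs, msgId, msgStr, out =>
    let msgDef := b.headD ""
    let paths := b.filter (fun l => PySem.Str.startswith l "# ./")
    let msgId := (b.reverse.find? (fun l => PySem.Str.startswith l "msgid \"")).getD msgId
    let msgStr := (b.reverse.find? (fun l => PySem.Str.startswith l "msgstr \"")).getD msgStr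
    getMsgsDictAltLoop bs msgId msgStr (out ++ [(msgDef, paths, msgId, msgStr)])

def getMsgsDict_alt (food : String) : List (String × List String × String × String) :=
  getMsgsDictAltLoop (pvToBlocks ((PySem.Str.splitlines food).map PySem.Str.strip)) "" "" []

-- ===== PRECONDITION & SPEC =====
def Spec_getMsgsDict (food : String) (out : List (String × List String × String × String)) : Prop := out = getMsgsDict_alt food
instance (food : String) (out : List (String × List String × String × String)) : Decidable (Spec_getMsgsDict food out) := by unfold Spec_getMsgsDict; infer_instance

-- ===== CLAIM (what is proved, stated in full; the proofs are below) =====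
def Claim_equal_getMsgsDict : Prop := ∀ (food : String), Dom_getMsgsDict food → Spec_getMsgsDict food (getMsgsDict food)

-- ===== LEMMAS AND PROOFS =====

theorem find?_concat_getD {α : Type} (p : α → Bool) (xs : List α) (s d : α) :
    ((xs ++ [s]).find? p).getD d = (xs.find? p).getD (if p s then s else d) := by
  induction xs with
  | nil => by_cases hs : p s <;> simp [List.find?, hs]
  | cons x xs ih =>
    by_cases h : p x
    · simp [List.find?, h]
    · simpa [List.find?, h] using ih

-- the combined block invariant: starting a new block / continuing a block mid-way
theorem loopA_eq_loopB (lines : List String) :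
    (∀ (dict : List (String × List String × String × String)) (msgDef msgId msgStr : String),
      getMsgsDictLoop lines [] dict msgDef msgId msgStr true =
        getMsgsDictAltLoop (pvToBlocks (lines.map PySem.Str.strip)) msgId msgStr dict) ∧
    (∀ (paths : List String) (dict : List (String × List String × String × String))
        (msgDef msgId msgStr : String),
      getMsgsDictLoop lines paths dict msgDef msgId msgStr false =
        match pvToBlocks (lines.map PySem.Str.strip) with
        | [] => dict
        | b :: bs =>
          let msgId' := (b.reverse.find? (fun l => PySem.Str.startswith l "msgid \"")).getD msgId
          let msgStr' := (b.reverse.find? (fun l => PySem.Str.startswith l "msgstr \"")).getD msgStr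
          getMsgsDictAltLoop bs msgId' msgStr'
            (dict ++ [(msgDef, paths ++ b.filter (fun l => PySem.Str.startswith l "# ./"), msgId', msgStr')])) := by
  induction lines with
  | nil =>
    constructor
    · intro dict msgDef msgId msgStr
      simp [getMsgsDictLoop, pvToBlocks, getMsgsDictAltLoop]
    · intro paths dict msgDef msgId msgStr
      simp [getMsgsDictLoop, pvToBlocks]
  | cons l rest ih =>
    obtain ⟨ihS, ihM⟩ := ih
    constructor
    · intro dict msgDef msgId msgStr
      by_cases h : PySem.Str.strip l = ""
      · simp [getMsgsDictLoop, h, pvToBlocks, getMsgsDictAltLoop, ihS, PySem.Chars.startswith]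
      · simp only [getMsgsDictLoop, List.map_cons, if_neg h, if_pos trivial]
        rw [ihM]
        simp only [pvToBlocks, if_neg h]
        cases hb : pvToBlocks (rest.map PySem.Str.strip) with
        | nil => simp [getMsgsDictAltLoop]
        | cons b bs =>
          simp only [getMsgsDictAltLoop, List.headD_cons, List.filter_cons, List.reverse_cons,
            find?_concat_getD]
          split_ifs <;> simp
    · intro paths dict msgDef msgId msgStr
      by_cases h : PySem.Str.strip l = ""
      · simp [getMsgsDictLoop, h, pvToBlocks, ihS, PySem.Chars.startswith]
      · simp only [getMsgsDictLoop, List.map_cons, if_neg h, Bool.false_eq_true, if_false]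
        rw [ihM]
        simp only [pvToBlocks, if_neg h]
        cases hb : pvToBlocks (rest.map PySem.Str.strip) with
        | nil => simp
        | cons b bs =>
          simp only [List.filter_cons, List.reverse_cons, find?_concat_getD]
          split_ifs <;> simp [List.append_assoc]

-- ===== VERDICT (by name: the statement is the Claim_ definition above) =====
theorem getMsgsDict_spec : Claim_equal_getMsgsDict := by
  intro food _
  unfold Spec_getMsgsDict getMsgsDict getMsgsDict_alt
  exact (loopA_eq_loopB (PySem.Str.splitlines food)).1 [] "" "" ""
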